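-- pv_equiv track=rewrite | github.com/Fredy518/alphaHome | scripts/production/factor_calculators/p_factor/p_factor_parallel_by_year.py | smart_year_allocation
-- ===== SOURCE A (Python) =====
-- def smart_year_allocation(years, workers):
--     """
--     智能年份分配算法
--     按时间顺序轮询分配，早期年份优先合并
--
--     Args:
--         years: 年份列表
--         workers: 工作进程数
--
--     Returns:
--         list: 每个进程分配的年份列表
--     """
--     total_years = len(years)
--
--     if total_years <= workers:
--         # 年份数 <= 进程数，每个进程分配一个年份
--         allocation = [[year] for year in years]
--         # 补充空列表
--         while len(allocation) < workers:
--             allocation.append([])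
--         return allocation
--
--     # 年份数 > 进程数，需要轮询分配
--     allocation = [[] for _ in range(workers)]
--
--     # 按年份排序（保持时间顺序）
--     years_sorted = sorted(years)
--
--     # 计算每个进程应该分配的年数
--     base_years_per_worker = total_years // workers  # 每个进程的基础年数
--     extra_years = total_years % workers  # 多出来的年数
--
--     # 前extra_years个进程多分配1年
--     years_per_worker = [base_years_per_worker + 1 if i < extra_years else base_years_per_worker
--                        for i in range(workers)]
--
--     # 按时间顺序分配年份
--     year_index = 0
--     for worker_id in range(workers):
--         for _ in range(years_per_worker[worker_id]):
--             if year_index < len(years_sorted):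
--                 allocation[worker_id].append(years_sorted[year_index])
--                 year_index += 1
--
--     return allocation
-- ===== SOURCE B (Python) =====
-- def smart_year_allocation(years, workers):
--     n = len(years)
--     if n <= workers:
--         return [[y] for y in years] + [[] for _ in range(workers - n)]
--     ys = sorted(years)
--     base, extra = divmod(n, workers)
--     return [ys[i * base + min(i, extra): (i + 1) * base + min(i + 1, extra)]
--             for i in range(workers)]
-- ===== Notes on version B (the rewrite author's own statement) =====
-- stated objective: simpler
-- what changed: Replaces A's mutable allocation array filled element-by-element through a running year index (nested loops with an in-range guard) by a single comprehension that computes each worker's contiguous chunk with closed-form slice boundaries start = i*base + min(i, extra).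
import Mathlib
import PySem

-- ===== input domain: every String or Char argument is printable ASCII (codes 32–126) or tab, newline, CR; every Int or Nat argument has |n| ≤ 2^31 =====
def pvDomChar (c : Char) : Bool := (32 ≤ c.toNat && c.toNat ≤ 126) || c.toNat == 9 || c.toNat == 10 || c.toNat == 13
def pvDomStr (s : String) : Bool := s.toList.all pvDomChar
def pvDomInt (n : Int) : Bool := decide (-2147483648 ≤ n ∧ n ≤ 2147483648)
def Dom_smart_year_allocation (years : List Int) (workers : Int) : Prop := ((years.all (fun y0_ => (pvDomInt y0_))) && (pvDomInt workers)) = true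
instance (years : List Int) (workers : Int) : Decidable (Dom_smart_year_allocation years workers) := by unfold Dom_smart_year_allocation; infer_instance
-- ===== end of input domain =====

-- B replaces A's running-index, element-by-element filling of a mutable allocation
-- array by one comprehension with closed-form slice boundaries (objective: simpler).

-- ===== PORT A =====
-- A's 'while len(allocation) < workers: allocation.append([])'
def padEmptyA (alloc : List (List Int)) (workers : Int) : List (List Int) :=
  if (alloc.length : Int) < workers then padEmptyA (alloc ++ [[]]) workers else alloc
termination_by (workers - alloc.length).toNat
decreasing_by simp; omega

def smart_year_allocation (years : List Int) (workers : Int) : List (List Int) :=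
  let total : Int := years.length
  if total ≤ workers then
    padEmptyA (years.map (fun y => [y])) workers
  else
    let alloc0 := (PySem.List.pyRange 0 workers 1).map (fun _ => ([] : List Int))
    let ys := PySem.List.sorted years (fun x => x) false
    let base := PySem.Int.floordiv total workers
    let extra := PySem.Int.mod total workers
    let ypw := (PySem.List.pyRange 0 workers 1).map
      (fun i => if i < extra then base + 1 else base)
    let res := (PySem.List.pyRange 0 workers 1).foldl
      (fun (st : List (List Int) × Int) wid =>
        (PySem.List.pyRange 0 (PySem.List.pyGetD ypw wid 0) 1).foldl
          (fun (st2 : List (List Int) × Int) _ =>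
            if st2.2 < (ys.length : Int) then
              -- allocation[worker_id].append(years_sorted[year_index]); year_index += 1
              (PySem.List.pySetD st2.1 wid
                 (PySem.List.pyGetD st2.1 wid [] ++ [PySem.List.pyGetD ys st2.2 0]),
               st2.2 + 1)
            else st2)
          st)
      (alloc0, (0 : Int))
    res.1

-- ===== PORT B =====
def smart_year_allocation_alt (years : List Int) (workers : Int) : List (List Int) :=
  let n : Int := years.length
  if n ≤ workers then
    years.map (fun y => [y]) ++ (PySem.List.pyRange 0 (workers - n) 1).map (fun _ => ([] : List Int))
  else
    let ys := PySem.List.sorted years (fun x => x) false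
    let base := PySem.Int.floordiv n workers
    let extra := PySem.Int.mod n workers
    (PySem.List.pyRange 0 workers 1).map (fun i =>
      PySem.List.slice ys (some (i * base + min i extra)) (some ((i + 1) * base + min (i + 1) extra)))

-- ===== PRECONDITION & SPEC =====
-- A raises ZeroDivisionError exactly when years is non-empty and workers = 0 (B raises there too).
def Pre_smart_year_allocation (years : List Int) (workers : Int) : Prop :=
  workers ≠ 0 ∨ years = []
instance (years : List Int) (workers : Int) : Decidable (Pre_smart_year_allocation years workers) := by
  unfold Pre_smart_year_allocation; infer_instance

def pvWitness_smart_year_allocation : List Int × Int := ([2003, 2001, 2002, 2000, 2004], 2)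

def Spec_smart_year_allocation (years : List Int) (workers : Int) (out : List (List Int)) : Prop := out = smart_year_allocation_alt years workers
instance (years : List Int) (workers : Int) (out : List (List Int)) : Decidable (Spec_smart_year_allocation years workers out) := by unfold Spec_smart_year_allocation; infer_instance

-- ===== CLAIM (what is proved, stated in full; the proofs are below) =====
def Claim_equal_smart_year_allocation : Prop := ∀ (years : List Int) (workers : Int), Dom_smart_year_allocation years workers → Pre_smart_year_allocation years workers → Spec_smart_year_allocation years workers (smart_year_allocation years workers)

-- ===== LEMMAS AND PROOFS =====

-- A's inner append loop body, as a function of the state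
def gA (ys : List Int) (wid : Int) (st2 : List (List Int) × Int) : List (List Int) × Int :=
  if st2.2 < (ys.length : Int) then
    (PySem.List.pySetD st2.1 wid
       (PySem.List.pyGetD st2.1 wid [] ++ [PySem.List.pyGetD ys st2.2 0]),
     st2.2 + 1)
  else st2

theorem pad_eq (alloc : List (List Int)) (workers : Int) :
    padEmptyA alloc workers = alloc ++ List.replicate (workers - alloc.length).toNat [] := by
  rw [padEmptyA]
  split
  · rename_i h
    rw [pad_eq (alloc ++ [[]]) workers]
    have h1 : (workers - alloc.length).toNat = (workers - (alloc ++ [[]]).length).toNat + 1 := by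
      simp; omega
    rw [h1, List.append_assoc]
    simp [List.replicate_succ]
  · rename_i h
    have : (workers - alloc.length).toNat = 0 := by omega
    simp [this]
termination_by (workers - alloc.length).toNat
decreasing_by simp; omega

-- m appends into slot wid, reading ys from idx on
theorem innerA (ys : List Int) (wid : Int) (m : Nat) :
    ∀ (alloc : List (List Int)) (idx : Int), 0 ≤ wid → wid < (alloc.length : Int) →
    0 ≤ idx → idx + m ≤ (ys.length : Int) →
    (gA ys wid)^[m] (alloc, idx)
      = (PySem.List.pySetD alloc wid
           (PySem.List.pyGetD alloc wid [] ++ ((ys.drop idx.toNat).take m)), idx + m) := by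
  induction m with
  | zero =>
    intro alloc idx hw hwl _ _
    have hwn : wid.toNat < alloc.length := by omega
    rw [Function.iterate_zero_apply, PySem.List.pySetD_of_nonneg _ _ hw,
        PySem.List.pyGetD_eq_getElem _ _ hw hwl]
    simp [List.set_getElem_self hwn]
  | succ m ih =>
    intro alloc idx hw hwl hidx hend
    rw [Function.iterate_succ_apply]
    have hlt : idx < (ys.length : Int) := by push_cast at hend ⊢; omega
    have hstep : gA ys wid (alloc, idx)
        = (PySem.List.pySetD alloc wid
             (PySem.List.pyGetD alloc wid [] ++ [PySem.List.pyGetD ys idx 0]), idx + 1) := by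
      simp [gA, hlt]
    rw [hstep]
    have hwl' : wid < ((PySem.List.pySetD alloc wid
        (PySem.List.pyGetD alloc wid [] ++ [PySem.List.pyGetD ys idx 0])).length : Int) := by
      rw [PySem.List.pySetD_of_nonneg _ _ hw]; simpa using hwl
    rw [ih _ _ hw hwl' (by omega) (by push_cast at hend ⊢; omega)]
    have hwn : wid.toNat < alloc.length := by omega
    have hset : ∀ v : List Int, PySem.List.pySetD alloc wid v = alloc.set wid.toNat v :=
      fun v => PySem.List.pySetD_of_nonneg _ _ hw
    have hget : PySem.List.pyGetD alloc wid ([] : List Int) = alloc[wid.toNat] :=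
      PySem.List.pyGetD_eq_getElem _ _ hw hwl
    have hget' : PySem.List.pyGetD (alloc.set wid.toNat
        (alloc[wid.toNat] ++ [PySem.List.pyGetD ys idx 0])) wid ([] : List Int)
        = alloc[wid.toNat] ++ [PySem.List.pyGetD ys idx 0] := by
      rw [PySem.List.pyGetD_eq_getElem _ _ hw (by simpa using hwl)]
      exact List.getElem_set_self (by simpa using hwn)
    rw [hset, hget, hget', PySem.List.pySetD_of_nonneg _ _ hw, List.set_set]
    have hidx1 : (idx + 1).toNat = idx.toNat + 1 := by omega
    have hys : PySem.List.pyGetD ys idx 0 = ys[idx.toNat]'(by omega) :=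
      PySem.List.pyGetD_eq_getElem _ _ hidx hlt
    have hdrop : ys.drop idx.toNat = ys[idx.toNat]'(by omega) :: ys.drop (idx.toNat + 1) :=
      List.drop_eq_getElem_cons (by omega)
    rw [Prod.mk.injEq]
    refine ⟨?_, by push_cast; omega⟩
    rw [hidx1, hys, hdrop, List.take_succ_cons, List.append_assoc]
    simp
    rw [hset]

-- A's worker loop, generalized over the remaining suffix of range(workers)
theorem outerA (ys : List Int) (workers base extra : Int)
    (hb : 0 ≤ base) (hx : 0 ≤ extra) (_hxw : extra < workers)
    (hn : base * workers + extra = (ys.length : Int)) :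
    ∀ (k : Nat) (d : Int) (done : List (List Int)),
    d + k = workers → 0 ≤ d → (done.length : Int) = d →
    ((PySem.List.pyRange d workers 1).foldl
      (fun (st : List (List Int) × Int) wid =>
        (PySem.List.pyRange 0
           (PySem.List.pyGetD ((PySem.List.pyRange 0 workers 1).map
             (fun i => if i < extra then base + 1 else base)) wid 0) 1).foldl
          (fun st2 _ => gA ys wid st2) st)
      (done ++ List.replicate k [], d * base + min d extra)).1
    = done ++ (PySem.List.pyRange d workers 1).map
        (fun i => PySem.List.slice ys (some (i * base + min i extra))
                    (some ((i + 1) * base + min (i + 1) extra))) := by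
  intro k
  induction k with
  | zero =>
    intro d done hdk hd hlen
    have : workers ≤ d := by omega
    simp [PySem.List.pyRange_one_eq_nil this]
  | succ k ih =>
    intro d done hdk hd hlen
    have hdw : d < workers := by omega
    rw [PySem.List.pyRange_one_cons hdw, List.foldl_cons, List.map_cons]
    -- the per-worker count
    set cnt : Int := if d < extra then base + 1 else base with hcntdef
    have hcnt : PySem.List.pyGetD ((PySem.List.pyRange 0 workers 1).map
        (fun i => if i < extra then base + 1 else base)) d 0 = cnt :=
      PySem.List.pyGetD_map_pyRange_of_nonneg _ _ _ _ hd (by omega)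
    have hcnt0 : 0 ≤ cnt := by rw [hcntdef]; split <;> omega
    set idx : Int := d * base + min d extra with hidxdef
    have hdb : 0 ≤ d * base := mul_nonneg hd hb
    have hidx0 : 0 ≤ idx := by rw [hidxdef]; omega
    have hrest : (0:Int) ≤ (workers - (d + 1)) * base := mul_nonneg (by omega) hb
    have hring : workers * base = (d + 1) * base + (workers - (d + 1)) * base := by ring
    have hring2 : (d + 1) * base = d * base + base := by ring
    have hnb : base * workers = workers * base := by ring
    have hend : idx + cnt = (d + 1) * base + min (d + 1) extra := by
      rw [hidxdef, hcntdef]; split <;> omega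
    have hendle : idx + cnt ≤ (ys.length : Int) := by omega
    -- one worker's inner loop
    rw [hcnt]
    have hlen1 : (PySem.List.pyRange 0 cnt 1).length = cnt.toNat := by
      simp [PySem.List.length_pyRange_one]
    rw [List.foldl_const (gA ys d) _ _, hlen1]
    have hwl : d < ((done ++ List.replicate (k+1) ([]:List Int)).length : Int) := by
      simp; omega
    have hcast : idx + (cnt.toNat : Int) = idx + cnt := by omega
    rw [innerA ys d cnt.toNat _ idx hd hwl hidx0 (by omega)]
    -- simplify the updated allocation
    have hdn : d.toNat = done.length := by omega
    have hget : PySem.List.pyGetD (done ++ List.replicate (k+1) ([]:List Int)) d [] = [] := by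
      rw [PySem.List.pyGetD_eq_getElem _ _ hd hwl, List.getElem_append_right (by omega)]
      simp
    have hset : PySem.List.pySetD (done ++ List.replicate (k+1) ([]:List Int)) d
        ([] ++ (ys.drop idx.toNat).take cnt.toNat)
        = (done ++ [(ys.drop idx.toNat).take cnt.toNat]) ++ List.replicate k [] := by
      rw [PySem.List.pySetD_of_nonneg _ _ hd, List.set_append, hdn]
      simp [List.replicate_succ]
    rw [hget, hset, hcast]
    -- the written chunk is B's slice
    have hslice : PySem.List.slice ys (some (d * base + min d extra))
        (some ((d + 1) * base + min (d + 1) extra))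
        = (ys.drop idx.toNat).take cnt.toNat := by
      rw [← hidxdef, ← hend, PySem.List.slice_toNat ys hidx0 (by omega)]
      congr 1
      omega
    rw [hslice]
    have := ih (d + 1) (done ++ [(ys.drop idx.toNat).take cnt.toNat])
      (by omega) (by omega) (by simp; omega)
    rw [hring2] at hend
    rw [show d * base + min d extra + cnt = (d+1) * base + min (d+1) extra by omega, this,
        List.append_assoc, List.singleton_append]

theorem branch_small (years : List Int) (workers : Int)
    (h : (years.length : Int) ≤ workers) :
    smart_year_allocation years workers = smart_year_allocation_alt years workers := by
  simp only [smart_year_allocation, smart_year_allocation_alt]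
  rw [if_pos h, if_pos h, pad_eq, List.map_const']
  simp [PySem.List.length_pyRange_one]

theorem branch_negative (years : List Int) (workers : Int)
    (hw : workers < 0) (h : ¬ (years.length : Int) ≤ workers) :
    smart_year_allocation years workers = smart_year_allocation_alt years workers := by
  simp only [smart_year_allocation, smart_year_allocation_alt]
  rw [if_neg h, if_neg h]
  simp [PySem.List.pyRange_one_eq_nil (by omega : workers ≤ 0)]

theorem branch_main (years : List Int) (workers : Int)
    (hw : 0 < workers) (h : ¬ (years.length : Int) ≤ workers) :
    smart_year_allocation years workers = smart_year_allocation_alt years workers := by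
  simp only [smart_year_allocation, smart_year_allocation_alt]
  rw [if_neg h, if_neg h]
  set ys := PySem.List.sorted years (fun x => x) false with hys
  have hyslen : ys.length = years.length := PySem.List.length_sorted ..
  set base := PySem.Int.floordiv (years.length : Int) workers with hbase
  set extra := PySem.Int.mod (years.length : Int) workers with hextra
  have hx0 : 0 ≤ extra := PySem.Int.mod_nonneg _ hw
  have hxw : extra < workers := PySem.Int.mod_lt _ hw
  have hsum : base * workers + extra = (ys.length : Int) := by
    rw [hyslen]; exact PySem.Int.floordiv_mul_add_mod _ _
  have hb0 : 0 ≤ base := by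
    rw [hbase, PySem.Int.floordiv_eq_ediv_of_pos hw]
    exact Int.ediv_nonneg (by positivity) (by omega)
  have halloc0 : (PySem.List.pyRange 0 workers 1).map (fun _ => ([] : List Int))
      = List.replicate workers.toNat [] := by
    rw [List.map_const']
    simp [PySem.List.length_pyRange_one]
  calc ((PySem.List.pyRange 0 workers 1).foldl
          (fun (st : List (List Int) × Int) wid =>
            (PySem.List.pyRange 0
               (PySem.List.pyGetD ((PySem.List.pyRange 0 workers 1).map
                 (fun i => if i < extra then base + 1 else base)) wid 0) 1).foldl
              (fun st2 _ => gA ys wid st2) st)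
          ((PySem.List.pyRange 0 workers 1).map (fun _ => ([] : List Int)), (0 : Int))).1
      = ([] : List (List Int)) ++ (PySem.List.pyRange 0 workers 1).map
          (fun i => PySem.List.slice ys (some (i * base + min i extra))
                      (some ((i + 1) * base + min (i + 1) extra))) := by
        rw [halloc0]
        have H := outerA ys workers base extra hb0 hx0 hxw hsum workers.toNat 0 []
          (by omega) le_rfl rfl
        rw [show (0:Int) * base + min 0 extra = 0 from by omega] at H
        exact H
    _ = (PySem.List.pyRange 0 workers 1).map
          (fun i => PySem.List.slice ys (some (i * base + min i extra))
                      (some ((i + 1) * base + min (i + 1) extra))) := by simp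

-- ===== VERDICT (by name: the statement is the Claim_ definition above) =====
theorem smart_year_allocation_spec : Claim_equal_smart_year_allocation := by
  intro years workers _ hpre
  unfold Spec_smart_year_allocation
  by_cases h : (years.length : Int) ≤ workers
  · exact branch_small years workers h
  · have hw0 : workers ≠ 0 := by
      rcases hpre with hp | hp
      · exact hp
      · subst hp
        intro h0
        subst h0
        exact h (by simp)
    rcases lt_or_ge 0 workers with hw | hw
    · exact branch_main years workers hw h
    · exact branch_negative years workers (by omega) h
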